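-- pv_equiv track=rewrite | github.com/chenghui2011001/DBP-JSCC | models/rvq_bottleneck.py | _allocate_bits
-- ===== SOURCE A (Python) =====
-- from typing import Dict, List, Optional, Tuple
--
-- def _allocate_bits(bits_total: int, num_codebooks: int) -> List[int]:
--     """
--     把总 bit 分配给多个 codebook，保证 sum(bits_i)=bits_total，
--     前面的 codebook 先分到 ceil，再把余数抹平。
--     """
--     bits_total = int(bits_total)
--     if bits_total <= 0 or num_codebooks <= 0:
--         return []
--     num_codebooks = int(num_codebooks)
--     base = bits_total // num_codebooks
--     rem = bits_total - base * num_codebooks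
--     bits = [base] * num_codebooks
--     for i in range(rem):
--         bits[i] += 1
--     # 可能出现 base=0 的情况（bits_total < num_codebooks），允许 0bit 的 stage 直接跳过
--     return bits
-- ===== SOURCE B (Python) =====
-- from typing import List
--
-- def _allocate_bits(bits_total: int, num_codebooks: int) -> List[int]:
--     bits_total = int(bits_total)
--     if bits_total <= 0 or num_codebooks <= 0:
--         return []
--     num_codebooks = int(num_codebooks)
--     # closed-form ceiling division: entry i gets ceil((bits_total - i) / num_codebooks)
--     return [(bits_total + num_codebooks - 1 - i) // num_codebooks
--             for i in range(num_codebooks)]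
-- ===== Notes on version B (the rewrite author's own statement) =====
-- stated objective: simpler
-- what changed: Replaces the base/remainder computation plus in-place increment loop over a mutable list by a single comprehension computing each entry directly with a closed-form floor division (bits_total + num_codebooks - 1 - i) // num_codebooks.
import Mathlib
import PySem

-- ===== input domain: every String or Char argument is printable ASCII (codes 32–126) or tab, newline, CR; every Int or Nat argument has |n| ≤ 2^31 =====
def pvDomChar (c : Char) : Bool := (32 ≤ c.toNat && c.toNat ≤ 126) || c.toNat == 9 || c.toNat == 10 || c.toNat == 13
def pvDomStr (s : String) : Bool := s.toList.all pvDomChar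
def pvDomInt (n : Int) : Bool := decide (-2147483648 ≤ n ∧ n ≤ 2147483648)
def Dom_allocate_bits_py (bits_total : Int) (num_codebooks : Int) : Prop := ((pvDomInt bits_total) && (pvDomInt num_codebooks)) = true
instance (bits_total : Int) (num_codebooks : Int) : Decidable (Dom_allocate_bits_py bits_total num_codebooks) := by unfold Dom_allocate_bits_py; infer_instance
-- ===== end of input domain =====

-- B computes each entry directly by a closed-form floor division instead of A's
-- base/remainder plus in-place increment loop (objective: simpler; same O(n) cost).

-- ===== PORT A =====
def allocate_bits_py (bits_total : Int) (num_codebooks : Int) : List Int :=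
  if bits_total ≤ 0 ∨ num_codebooks ≤ 0 then []
  else
    let base := PySem.Int.floordiv bits_total num_codebooks
    let rem := bits_total - base * num_codebooks
    let bits := List.replicate num_codebooks.toNat base
    (PySem.List.pyRange 0 rem 1).foldl
      (fun bs i => bs.set i.toNat (bs.getD i.toNat 0 + 1)) bits

-- ===== PORT B =====
def allocate_bits_py_alt (bits_total : Int) (num_codebooks : Int) : List Int :=
  if bits_total ≤ 0 ∨ num_codebooks ≤ 0 then []
  else
    (PySem.List.pyRange 0 num_codebooks 1).map
      (fun i => PySem.Int.floordiv (bits_total + num_codebooks - 1 - i) num_codebooks)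

-- ===== PRECONDITION & SPEC =====
def Spec_allocate_bits_py (bits_total : Int) (num_codebooks : Int) (out : List Int) : Prop := out = allocate_bits_py_alt bits_total num_codebooks
instance (bits_total : Int) (num_codebooks : Int) (out : List Int) : Decidable (Spec_allocate_bits_py bits_total num_codebooks out) := by unfold Spec_allocate_bits_py; infer_instance

-- ===== CLAIM (what is proved, stated in full; the proofs are below) =====
def Claim_equal_allocate_bits_py : Prop := ∀ (bits_total : Int) (num_codebooks : Int), Dom_allocate_bits_py bits_total num_codebooks → Spec_allocate_bits_py bits_total num_codebooks (allocate_bits_py bits_total num_codebooks)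

-- ===== LEMMAS AND PROOFS =====

-- A's increment loop over range(rem) turns the replicate list into an explicit map.
theorem foldA_eq_map (N : Nat) (base : Int) :
    ∀ (r : Nat), r ≤ N →
      (List.range r).foldl (fun bs i => bs.set i (bs.getD i 0 + 1))
          (List.replicate N base)
        = (List.range N).map (fun j => if j < r then base + 1 else base) := by
  intro r
  induction r with
  | zero =>
      intro _
      simp [List.foldl_nil, List.map_const']
  | succ r ih =>
      intro hr
      rw [List.range_succ, List.foldl_append, ih (by omega)]
      simp only [List.foldl_cons, List.foldl_nil]
      have hlen : ((List.range N).map (fun j => if j < r then base + 1 else base)).length = N := by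
        simp
      apply List.ext_getElem
      · simp
      · intro i h1 h2
        have hiN : i < N := by simpa [hlen] using h1
        have hgd : ((List.range N).map (fun j => if j < r then base + 1 else base)).getD r 0
            = base := by
          rw [List.getD_eq_getElem _ _ (by omega : r < ((List.range N).map
            (fun j => if j < r then base + 1 else base)).length)]
          simp
        rw [List.getElem_set]
        by_cases hir : r = i
        · subst hir
          simp [List.getD, hiN]
        · simp only [if_neg hir]
          simp only [List.getElem_map, List.getElem_range]
          have : (i < r) ↔ (i < r + 1) := by omega
          simp [this]

theorem allocate_bits_py_eq (t n : Int) (ht : 0 < t) (hn : 0 < n) :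
    allocate_bits_py t n = allocate_bits_py_alt t n := by
  unfold allocate_bits_py allocate_bits_py_alt
  rw [if_neg (by omega), if_neg (by omega)]
  set base := PySem.Int.floordiv t n with hbase
  have hsum := PySem.Int.floordiv_mul_add_mod t n
  have hrem : t - base * n = PySem.Int.mod t n := by rw [hbase]; omega
  have hmod0 : 0 ≤ PySem.Int.mod t n := PySem.Int.mod_nonneg t hn
  have hmodn : PySem.Int.mod t n < n := PySem.Int.mod_lt t hn
  dsimp only
  rw [hrem]
  set m := PySem.Int.mod t n with hm
  rw [PySem.List.pyRange_one 0 m, PySem.List.pyRange_one 0 n]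
  simp only [zero_add, sub_zero, List.foldl_map, List.map_map]
  have := foldA_eq_map n.toNat base m.toNat (by omega)
  simp only [Int.toNat_natCast] at this ⊢
  rw [this]
  apply List.map_congr_left
  intro j hj
  have hjn : j < n.toNat := List.mem_range.mp hj
  have hjn' : (j : Int) < n := by omega
  simp only [Function.comp]
  by_cases hjr : j < m.toNat
  · rw [if_pos hjr]
    symm
    rw [PySem.Int.floordiv_eq_iff_of_pos hn]
    have hjm : (j : Int) < m := by omega
    constructor
    · nlinarith [hsum]
    · nlinarith [hsum]
  · rw [if_neg hjr]
    symm
    rw [PySem.Int.floordiv_eq_iff_of_pos hn]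
    have hjm : m ≤ (j : Int) := by omega
    constructor
    · nlinarith [hsum]
    · nlinarith [hsum]

-- ===== VERDICT (by name: the statement is the Claim_ definition above) =====
theorem allocate_bits_py_spec : Claim_equal_allocate_bits_py := by
  intro t n _
  unfold Spec_allocate_bits_py
  by_cases h : t ≤ 0 ∨ n ≤ 0
  · unfold allocate_bits_py allocate_bits_py_alt
    rw [if_pos h, if_pos h]
  · exact allocate_bits_py_eq t n (by omega) (by omega)
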